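-- pv_equiv track=rewrite | github.com/sheryllan/Algo | DynamicProgramming/N_divisible_by_prime.py | get_count_nums_primes_divisible
-- ===== SOURCE A (Python) =====
-- from math import sqrt
--
-- def get_primes(N: int):
--     is_prime = [True] * (N + 1)
--     for x in range(2, int(sqrt(N)) + 1):
--         if not is_prime[x]:
--             continue
--
--         for i in range(x**2, N + 1, x):
--             is_prime[i] = False
--
--     for x in range(2, N + 1):
--         if is_prime[x]:
--             yield x
--
-- def get_count_nums_primes_divisible(N):
--     count = 0
--     marked = [0] * (N + 1)
--     for p in get_primes(N // 2):  # because 2 is the smallest prime number, after N//2 there will be no multiple of 2 primes within N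
--         for x in range(p, N + 1, p):
--             count += marked[x]
--             marked[x] += 1
--
--     return count
-- ===== SOURCE B (Python) =====
-- from math import sqrt
--
-- def get_count_nums_primes_divisible(N):
--     limit = N // 2
--     is_prime = [True] * (limit + 1)
--     for x in range(2, int(sqrt(limit)) + 1):
--         if is_prime[x]:
--             for i in range(x ** 2, limit + 1, x):
--                 is_prime[i] = False
--     primes = [x for x in range(2, limit + 1) if is_prime[x]]
--     count = 0
--     for i in range(len(primes)):
--         p = primes[i]
--         for j in range(i + 1, len(primes)):
--             pq = p * primes[j]
--             if pq > N:
--                 break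
--             count += N // pq
--     return count
-- ===== Notes on version B (the rewrite author's own statement) =====
-- stated objective: faster
-- what changed: B keeps A's sieve but drops the marked array and the multiples-walk accumulation entirely: it sums N//(p*q) over prime pairs p<q with p*q<=N (breaking the inner loop once p*q>N), using the identity sum_x C(omega(x),2) = sum_{p<q, pq<=N} floor(N/(pq)).
import Mathlib
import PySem

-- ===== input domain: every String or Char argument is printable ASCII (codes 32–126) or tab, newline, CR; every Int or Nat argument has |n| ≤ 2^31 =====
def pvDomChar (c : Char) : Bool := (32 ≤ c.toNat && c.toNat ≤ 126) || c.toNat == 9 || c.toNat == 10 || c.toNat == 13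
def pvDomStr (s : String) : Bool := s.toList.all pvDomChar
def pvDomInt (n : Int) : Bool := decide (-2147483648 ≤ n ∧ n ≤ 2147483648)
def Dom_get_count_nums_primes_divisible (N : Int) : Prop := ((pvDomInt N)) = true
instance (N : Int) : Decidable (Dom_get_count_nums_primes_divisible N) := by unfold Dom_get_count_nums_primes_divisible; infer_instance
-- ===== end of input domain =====

-- B replaces A's marked-array multiples-walk by a sum of N//(p*q) over prime pairs p<q with
-- p*q ≤ N (identity: Σ_{x≤N} C(ω(x),2) = Σ_{p<q, pq≤N} ⌊N/(pq)⌋); measurably faster at large N.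

-- ===== PORT A =====
-- shared helper: the Eratosthenes marking pass both Python sources contain verbatim
-- (A inside get_primes, B inline).  int(sqrt(M)) is ported as Nat.sqrt M.toNat: exact for
-- 0 ≤ M ≤ 2^31 (double sqrt is correctly rounded; it cannot cross an integer boundary at this
-- magnitude).  List reads/writes use .toNat indices: in range and nonneg whenever this line is
-- reached (for M < 0 Python raises ValueError before any indexing; excluded by Pre_).
def pvSieve (M : Int) : Array Bool :=
  (PySem.List.pyRange 2 (((Nat.sqrt M.toNat : Nat) : Int) + 1) 1).foldl
    (fun isp x =>
      if isp.getD x.toNat false then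
        (PySem.List.pyRange (x ^ 2) (M + 1) x).foldl (fun a i => a.setIfInBounds i.toNat false) isp
      else isp)
    (Array.replicate (M + 1).toNat true)

-- A's get_primes(N) generator, collected as the list it yields
def pvGetPrimes (M : Int) : List Int :=
  let isp := pvSieve M
  ((PySem.List.pyRange 2 (M + 1) 1).foldl
    (fun acc x => if isp.getD x.toNat false then acc.push x else acc) (#[] : Array Int)).toList

def get_count_nums_primes_divisible (N : Int) : Int :=
  ((pvGetPrimes (PySem.Int.floordiv N 2)).foldl
    (fun st p =>
      (PySem.List.pyRange p (N + 1) p).foldl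
        (fun st x => (st.1 + st.2.getD x.toNat 0, st.2.setIfInBounds x.toNat (st.2.getD x.toNat 0 + 1)))
        st)
    ((0 : Int), Array.replicate (N + 1).toNat (0 : Int))).1

-- ===== PORT B =====
-- inner 'for j in range(i+1, len(primes))' with its break, over the suffix primes[i+1:]
def pvInnerB (N p : Int) : List Int → Int → Int
  | [], count => count
  | q :: qs, count =>
      if p * q > N then count
      else pvInnerB N p qs (count + PySem.Int.floordiv N (p * q))

-- outer 'for i in range(len(primes))', over suffixes
def pvOuterB (N : Int) : List Int → Int → Int
  | [], count => count
  | p :: ps, count => pvOuterB N ps (pvInnerB N p ps count)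

def get_count_nums_primes_divisible_alt (N : Int) : Int :=
  let limit := PySem.Int.floordiv N 2
  let isp := pvSieve limit
  let primes := (PySem.List.pyRange 2 (limit + 1) 1).filter (fun x => isp.getD x.toNat false)
  pvOuterB N primes 0

-- ===== PRECONDITION & SPEC =====
-- Pre_ excludes negative N, where both Pythons raise ValueError (math.sqrt of a negative).
def Pre_get_count_nums_primes_divisible (N : Int) : Prop := 0 ≤ N
instance (N : Int) : Decidable (Pre_get_count_nums_primes_divisible N) := by
  unfold Pre_get_count_nums_primes_divisible; infer_instance

def pvWitness_get_count_nums_primes_divisible : Int := 30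

def Spec_get_count_nums_primes_divisible (N : Int) (out : Int) : Prop :=
  out = get_count_nums_primes_divisible_alt N
instance (N : Int) (out : Int) : Decidable (Spec_get_count_nums_primes_divisible N out) := by
  unfold Spec_get_count_nums_primes_divisible; infer_instance

-- ===== CLAIM (what is proved, stated in full; the proofs are below) =====
def Claim_equal_get_count_nums_primes_divisible : Prop :=
  ∀ (N : Int), Dom_get_count_nums_primes_divisible N →
    Pre_get_count_nums_primes_divisible N →
      Spec_get_count_nums_primes_divisible N (get_count_nums_primes_divisible N)

-- ===== LEMMAS AND PROOFS =====

-- A's count grouped by the LATER prime (running prefix 'pre' of already-processed primes)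
def pvAf (f : Int → Int → Int) (pre : List Int) : List Int → Int
  | [] => 0
  | p :: t => (pre.map (fun q => f q p)).sum + pvAf f (pre ++ [p]) t

-- B's count grouped by the EARLIER prime (suffix form)
def pvS (f : Int → Int → Int) : List Int → Int
  | [] => 0
  | p :: t => (t.map (fun b => f p b)).sum + pvS f t

-- number of x in A's inner range for the later prime b that the earlier prime a divides
def pvT (N a b : Int) : Int :=
  ((PySem.List.pyRange b (N + 1) b).countP (fun x => decide (a ∣ x)) : Int)

lemma pvAf_eq_pvS (f : Int → Int → Int) :
    ∀ (ps pre : List Int),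
      pvAf f pre ps = (ps.map (fun b => (pre.map (fun a => f a b)).sum)).sum + pvS f ps := by
  intro ps
  induction ps with
  | nil => intro pre; simp [pvAf, pvS]
  | cons p t ih =>
    intro pre
    simp only [pvAf, pvS, ih (pre ++ [p]), List.map_cons, List.sum_cons, List.map_append,
      List.sum_append, List.map_nil, List.sum_nil, add_zero]
    rw [PySem.List.sum_map_add_int]; ring

lemma pvS_congr (f g : Int → Int → Int) :
    ∀ ps : List Int, ps.Pairwise (fun a b => f a b = g a b) → pvS f ps = pvS g ps := by
  intro ps
  induction ps with
  | nil => intro _; rfl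
  | cons p t ih =>
    intro h
    rw [List.pairwise_cons] at h
    simp only [pvS, ih h.2]
    congr 1
    exact congrArg List.sum (List.map_congr_left fun b hb => h.1 b hb)

lemma nodup_pyRange_pos (a b s : Int) (hs : 0 < s) : (PySem.List.pyRange a b s).Nodup := by
  rw [PySem.List.pyRange_of_pos a b hs]
  refine List.Nodup.map ?_ (List.nodup_range)
  intro x y hxy
  have h2 : s * (x:Int) = s * y := by linarith
  have := mul_left_cancel₀ (ne_of_gt hs) h2
  exact_mod_cast this

lemma pvCount_exchange (L : List Int) :
    ∀ pre : List Int,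
      (L.map (fun x => (pre.countP (fun q => decide (q ∣ x)) : Int))).sum
        = (pre.map (fun q => (L.countP (fun x => decide (q ∣ x)) : Int))).sum := by
  intro pre
  induction pre with
  | nil => simp
  | cons q t ih =>
    simp only [List.map_cons, List.sum_cons, ← ih]
    rw [← PySem.List.sum_map_ite_one_zero (fun x => decide (q ∣ x)) L, ← List.sum_map_add]
    congr 1
    refine List.map_congr_left fun x _ => ?_
    rw [List.countP_cons]
    push_cast
    by_cases h : q ∣ x
    · simp [h]; ring
    · simp [h]

lemma pvCountP_dvd_range (d m : Nat) :
    (List.range m).countP (fun k => decide (d ∣ k + 1)) = m / d := by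
  induction m with
  | zero => simp
  | succ n ih =>
    rw [List.range_succ, List.countP_append, ih, Nat.succ_div]
    by_cases h : d ∣ n + 1
    · simp [h]
    · simp [h]

lemma pvInnerA_spec (L : List Int) :
    ∀ (c : Int) (m : Array Int), L.Nodup → (∀ x ∈ L, 1 ≤ x) →
      (L.foldl (fun st x =>
          (st.1 + st.2.getD x.toNat 0, st.2.setIfInBounds x.toNat (st.2.getD x.toNat 0 + 1))) (c, m)).1
        = c + (L.map (fun x => m.getD x.toNat 0)).sum
      ∧ (L.foldl (fun st x =>
          (st.1 + st.2.getD x.toNat 0, st.2.setIfInBounds x.toNat (st.2.getD x.toNat 0 + 1))) (c, m)).2.size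
        = m.size
      ∧ ∀ k : Nat,
          (L.foldl (fun st x =>
            (st.1 + st.2.getD x.toNat 0, st.2.setIfInBounds x.toNat (st.2.getD x.toNat 0 + 1))) (c, m)).2.getD k 0
          = m.getD k 0 + (if ((k : Int) ∈ L ∧ k < m.size) then 1 else 0) := by
  induction L with
  | nil => intro c m _ _; simp
  | cons x t ih =>
    intro c m hnd hpos
    rw [List.nodup_cons] at hnd
    have hx1 : 1 ≤ x := hpos x List.mem_cons_self
    set m1 := m.setIfInBounds x.toNat (m.getD x.toNat 0 + 1) with hm1
    have hlen1 : m1.size = m.size := by simp [hm1]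
    obtain ⟨h1, h2, h3⟩ := ih (c + m.getD x.toNat 0) m1 hnd.2
      (fun y hy => hpos y (List.mem_cons_of_mem _ hy))
    refine ⟨?_, by simpa [hlen1, hm1] using h2, ?_⟩
    · rw [List.foldl_cons]
      simp only at h1 ⊢
      rw [h1]
      simp only [List.map_cons, List.sum_cons]
      have : (t.map (fun y => m1.getD y.toNat 0)) = t.map (fun y => m.getD y.toNat 0) := by
        refine List.map_congr_left fun y hy => ?_
        have hyx : y ≠ x := fun h => hnd.1 (h ▸ hy)
        have hy1 : 1 ≤ y := hpos y (List.mem_cons_of_mem _ hy)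
        have : y.toNat ≠ x.toNat := by omega
        rw [hm1, Array.getD_eq_getD_getElem?, Array.getElem?_setIfInBounds,
          if_neg (fun h => this h.symm), ← Array.getD_eq_getD_getElem?]
      rw [this]; ring
    · intro k
      rw [List.foldl_cons]
      simp only at h3 ⊢
      rw [h3 k, hlen1]
      by_cases hkx : (k : Int) = x
      · have hik : x.toNat = k := by omega
        have hkt : (k : Int) ∉ t := fun h => hnd.1 (hkx ▸ h)
        by_cases hklen : k < m.size
        · rw [if_neg (fun h => hkt h.1), if_pos ⟨by simp [hkx], hklen⟩, hm1,
            Array.getD_eq_getD_getElem?, Array.getElem?_setIfInBounds, if_pos hik, if_pos (hik ▸ hklen)]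
          simp [hik]
        · rw [if_neg (fun h => hkt h.1), if_neg (fun h => hklen h.2), hm1,
            Array.getD_eq_getD_getElem?, Array.getElem?_setIfInBounds, if_pos hik,
            if_neg (by omega : ¬ x.toNat < m.size)]
          simp [Array.getD_eq_getD_getElem?, Array.getElem?_eq_none (le_of_not_gt hklen)]
      · have hik : x.toNat ≠ k := by omega
        have hm1k : m1.getD k 0 = m.getD k 0 := by
          rw [hm1, Array.getD_eq_getD_getElem?, Array.getElem?_setIfInBounds, if_neg hik,
            ← Array.getD_eq_getD_getElem?]
        rw [hm1k]
        congr 1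
        simp [List.mem_cons, hkx]

-- a Python-list append loop 'if p(x): out.append(x)', accumulated in an Array
lemma pvFoldlPushIf_eq_filter (p : Int → Bool) :
    ∀ (l : List Int) (acc : Array Int),
      (l.foldl (fun acc x => if p x then acc.push x else acc) acc).toList
        = acc.toList ++ l.filter p := by
  intro l
  induction l with
  | nil => intro acc; simp
  | cons x t ih =>
    intro acc
    rw [List.foldl_cons, List.filter_cons]
    by_cases h : p x
    · rw [if_pos h, if_pos h, ih, Array.toList_push]
      simp
    · rw [if_neg h, if_neg (by simp [h]), ih]

lemma pvOuterA_spec (N : Int) (hN : 0 ≤ N) :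
    ∀ (ps pre : List Int) (c : Int) (m : Array Int),
      m.size = (N + 1).toNat →
      (∀ k : Nat, 1 ≤ k → k < m.size →
        m.getD k 0 = (pre.countP (fun q => decide (q ∣ (k : Int))) : Int)) →
      (∀ p ∈ ps, 1 ≤ p) →
      (ps.foldl (fun st p =>
          (PySem.List.pyRange p (N + 1) p).foldl (fun st x =>
            (st.1 + st.2.getD x.toNat 0, st.2.setIfInBounds x.toNat (st.2.getD x.toNat 0 + 1))) st)
        (c, m)).1 = c + pvAf (pvT N) pre ps := by
  intro ps
  induction ps with
  | nil => intro pre c m _ _ _; simp [pvAf]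
  | cons p t ih =>
    intro pre c m hmlen hmod hpos
    have hp1 : 1 ≤ p := hpos p List.mem_cons_self
    have hpp : (0:Int) < p := by omega
    set L := PySem.List.pyRange p (N + 1) p with hL
    have hmemL : ∀ x, x ∈ L ↔ p ≤ x ∧ x < N + 1 ∧ p ∣ x - p := fun x =>
      PySem.List.mem_pyRange_iff_of_pos hpp x
    have hLpos : ∀ x ∈ L, 1 ≤ x := fun x hx => by
      have := (hmemL x).1 hx; omega
    obtain ⟨h1, h2, h3⟩ := pvInnerA_spec L c m (nodup_pyRange_pos _ _ _ hpp) hLpos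
    rw [List.foldl_cons]
    -- the state after the inner fold
    have key : ∀ st : Int × Array Int, st = (c, m) →
      (L.foldl (fun st x =>
        (st.1 + st.2.getD x.toNat 0, st.2.setIfInBounds x.toNat (st.2.getD x.toNat 0 + 1))) st)
      = ((L.foldl (fun st x =>
        (st.1 + st.2.getD x.toNat 0, st.2.setIfInBounds x.toNat (st.2.getD x.toNat 0 + 1))) (c, m)).1,
         (L.foldl (fun st x =>
        (st.1 + st.2.getD x.toNat 0, st.2.setIfInBounds x.toNat (st.2.getD x.toNat 0 + 1))) (c, m)).2) := by
      intro st hst; rw [hst]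
    rw [key (c, m) rfl, ih (pre ++ [p]) _ _ (by rw [h2, hmlen]) ?_ 
      (fun q hq => hpos q (List.mem_cons_of_mem _ hq))]
    · -- sum part
      rw [h1]
      have hread : (L.map (fun x => m.getD x.toNat 0)).sum
          = (pre.map (fun q => (L.countP (fun x => decide (q ∣ x)) : Int))).sum := by
        rw [← pvCount_exchange]
        congr 1
        refine List.map_congr_left fun x hx => ?_
        have hx' := (hmemL x).1 hx
        have hxlen : x.toNat < m.size := by rw [hmlen]; omega
        have hx1 : (1:Nat) ≤ x.toNat := by omega
        have := hmod x.toNat hx1 hxlen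
        rw [this]
        congr 1
        simp [Int.toNat_of_nonneg (by omega : (0:Int) ≤ x)]
      rw [hread]
      have hT : (pre.map (fun q => (L.countP (fun x => decide (q ∣ x)) : Int))).sum
          = (pre.map (fun q => pvT N q p)).sum := rfl
      simp only [pvAf]
      rw [hT]; ring
    · -- new model
      intro k hk1 hklen
      rw [h2] at hklen
      rw [h3 k, hmod k hk1 hklen, List.countP_append]
      have hmem : ((k : Int) ∈ L ∧ k < m.size) ↔ p ∣ (k : Int) := by
        rw [hmemL]
        constructor
        · rintro ⟨⟨_, _, hdvd⟩, _⟩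
          have := dvd_add hdvd (dvd_refl p)
          simpa using this
        · intro hdvd
          have hple : p ≤ (k:Int) := Int.le_of_dvd (by omega) hdvd
          refine ⟨⟨hple, ?_, ?_⟩, hklen⟩
          · rw [hmlen] at hklen; omega
          · exact dvd_sub hdvd (dvd_refl p)
      push_cast
      by_cases hd : p ∣ (k : Int)
      · rw [if_pos (hmem.2 hd)]
        simp [hd]
      · rw [if_neg (fun h => hd (hmem.1 h))]
        simp [hd]

lemma pvT_eq_floordiv (N a b : Int) (hN : 0 ≤ N) (h2a : 2 ≤ a) (h2b : 2 ≤ b)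
    (ha : Nat.Prime a.toNat) (hb : Nat.Prime b.toNat) (hab : a ≠ b) :
    pvT N a b = PySem.Int.floordiv N (a * b) := by
  have hbpos : (0:Int) < b := by omega
  have hapos : (0:Int) < a := by omega
  have hcop : (a.toNat).Coprime b.toNat :=
    (Nat.coprime_primes ha hb).2 (fun h => hab (by omega))
  have hrange : PySem.List.pyRange b (N + 1) b
      = (List.range (N / b).toNat).map (fun (k : Nat) => b + b * (k : Int)) := by
    rw [PySem.List.pyRange_of_pos _ _ hbpos]
    have hm : (if b < N + 1 then ((N + 1 - b + b - 1) / b).toNat else 0) = (N / b).toNat := by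
      by_cases h : b < N + 1
      · rw [if_pos h]
        have : N + 1 - b + b - 1 = N := by ring
        rw [this]
      · rw [if_neg h, Int.ediv_eq_zero_of_lt hN (by omega)]
        rfl
    rw [hm]
  rw [pvT, hrange, List.countP_map]
  have hpred : ∀ k : Nat, (fun x => decide (a ∣ x)) ((fun k : Nat => b + b * (k:Int)) k)
      = decide (a.toNat ∣ k + 1) := by
    intro k
    show decide (a ∣ b + b * (k:Int)) = decide (a.toNat ∣ k + 1)
    simp only [decide_eq_decide]
    have h1 : b + b * (k:Int) = b * ((k:Int) + 1) := by ring
    rw [h1]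
    have h2 : (b * ((k:Int) + 1)) = ((b.toNat * (k + 1) : Nat) : Int) := by
      push_cast
      rw [Int.toNat_of_nonneg (le_of_lt hbpos)]
    have h3 : a = ((a.toNat : Nat) : Int) := by omega
    rw [h2, h3, Int.natCast_dvd_natCast]
    constructor
    · intro h
      exact (Nat.Coprime.dvd_of_dvd_mul_left hcop h)
    · intro h
      exact Dvd.dvd.mul_left h _
  have : List.countP ((fun x => decide (a ∣ x)) ∘ (fun k : Nat => b + b * (k:Int)))
      (List.range (N / b).toNat) = List.countP (fun k => decide (a.toNat ∣ k + 1))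
      (List.range (N / b).toNat) := by
    apply List.countP_congr
    intro k _
    simpa using congrArg (· = true) (hpred k)
  rw [this, pvCountP_dvd_range _ _]
  rw [PySem.Int.floordiv_eq_ediv_of_pos (by positivity)]
  rw [mul_comm a b, ← Int.ediv_ediv_of_nonneg (le_of_lt hbpos)]
  have hq : 0 ≤ N / b := Int.ediv_nonneg hN (le_of_lt hbpos)
  rw [Int.natCast_div, Int.toNat_of_nonneg hq]
  congr 1
  omega

lemma pvInnerB_spec (N p : Int) (hN : 0 ≤ N) (hp : 1 ≤ p) :
    ∀ (qs : List Int) (c : Int), qs.Pairwise (· < ·) → (∀ q ∈ qs, 1 ≤ q) →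
      pvInnerB N p qs c = c + (qs.map (fun q => PySem.Int.floordiv N (p * q))).sum := by
  intro qs
  induction qs with
  | nil => intro c _ _; simp [pvInnerB]
  | cons q t ih =>
    intro c hpw hpos
    rw [List.pairwise_cons] at hpw
    by_cases h : p * q > N
    · -- break: every remaining term is zero
      have hz : ∀ r ∈ q :: t, PySem.Int.floordiv N (p * r) = 0 := by
        intro r hr
        have hqr : q ≤ r := by
          rcases hr with _ | hr
          · exact le_refl q
          · exact le_of_lt (hpw.1 r (by assumption))
        have hrpos : 0 < p * r := by
          have := hpos r hr; positivity
        rw [PySem.Int.floordiv_eq_ediv_of_pos hrpos]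
        apply Int.ediv_eq_zero_of_lt hN
        nlinarith [hpos q (List.mem_cons_self)]
      simp only [pvInnerB, if_pos h]
      have : ((q :: t).map (fun r => PySem.Int.floordiv N (p * r))).sum = 0 := by
        apply List.sum_eq_zero
        intro x hx
        rw [List.mem_map] at hx
        obtain ⟨r, hr, rfl⟩ := hx
        exact hz r hr
      rw [this, add_zero]
    · simp only [pvInnerB, if_neg h]
      rw [ih _ hpw.2 (fun x hx => hpos x (List.mem_cons_of_mem _ hx))]
      simp only [List.map_cons, List.sum_cons]
      ring

lemma pvOuterB_spec (N : Int) (hN : 0 ≤ N) :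
    ∀ (ps : List Int) (c : Int), ps.Pairwise (· < ·) → (∀ p ∈ ps, 1 ≤ p) →
      pvOuterB N ps c = c + pvS (fun a b => PySem.Int.floordiv N (a * b)) ps := by
  intro ps
  induction ps with
  | nil => intro c _ _; simp [pvOuterB, pvS]
  | cons p t ih =>
    intro c hpw hpos
    rw [List.pairwise_cons] at hpw
    simp only [pvOuterB, pvS]
    rw [ih _ hpw.2 (fun x hx => hpos x (List.mem_cons_of_mem _ hx)),
      pvInnerB_spec N p hN (hpos p List.mem_cons_self) t c hpw.2
        (fun x hx => hpos x (List.mem_cons_of_mem _ hx))]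
    ring

lemma pvSetFalse_spec (L : List Int) :
    ∀ arr : Array Bool, (∀ i ∈ L, 0 ≤ i) →
      (L.foldl (fun a i => a.setIfInBounds i.toNat false) arr).size = arr.size
      ∧ ∀ k : Nat, (L.foldl (fun a i => a.setIfInBounds i.toNat false) arr).getD k false
          = if (k : Int) ∈ L then false else arr.getD k false := by
  induction L with
  | nil => intro arr _; simp
  | cons i t ih =>
    intro arr hpos
    have hi : 0 ≤ i := hpos i List.mem_cons_self
    obtain ⟨hlen, hget⟩ := ih (arr.setIfInBounds i.toNat false) (fun j hj => hpos j (List.mem_cons_of_mem _ hj))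
    refine ⟨by simpa using hlen, fun k => ?_⟩
    simp only [List.foldl_cons, hget k, List.mem_cons]
    by_cases hkt : (k : Int) ∈ t
    · simp [hkt]
    · by_cases hki : (k : Int) = i
      · have hik : i.toNat = k := by omega
        rw [if_neg hkt, if_pos (Or.inl hki),
          Array.getD_eq_getD_getElem?, Array.getElem?_setIfInBounds, if_pos hik]
        split_ifs <;> simp
      · have : i.toNat ≠ k := by omega
        simp [hkt, hki, Array.getD_eq_getD_getElem?, this]

-- the sieve invariant after the outer loop has processed 2,…,v-1
def pvInv (M : Int) (arr : Array Bool) (v : Int) : Prop :=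
  arr.size = M.toNat + 1
  ∧ (∀ p : Nat, Nat.Prime p → p ≤ M.toNat → arr.getD p false = true)
  ∧ (∀ k : Nat, 2 ≤ k → k ≤ M.toNat → ¬ Nat.Prime k → ((k.minFac : Int) < v) →
      arr.getD k false = false)

lemma pvStep_inv (M : Int) (arr : Array Bool) (v : Int) (hv : 2 ≤ v)
    (hinv : pvInv M arr v) :
    pvInv M (if arr.getD v.toNat false then
        (PySem.List.pyRange (v ^ 2) (M + 1) v).foldl (fun a i => a.setIfInBounds i.toNat false) arr
      else arr) (v + 1) := by
  obtain ⟨hlen, hprime, hcomp⟩ := hinv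
  by_cases hflag : arr.getD v.toNat false
  · rw [if_pos hflag]
    have hvpos : (0:Int) < v := by omega
    set L := PySem.List.pyRange (v ^ 2) (M + 1) v with hL
    have hmemL : ∀ x : Int, x ∈ L ↔ v ^ 2 ≤ x ∧ x < M + 1 ∧ v ∣ x - v ^ 2 := fun x =>
      PySem.List.mem_pyRange_iff_of_pos hvpos x
    have hLnonneg : ∀ i ∈ L, 0 ≤ i := by
      intro i hi; have := (hmemL i).1 hi; nlinarith
    obtain ⟨hlen', hget'⟩ := pvSetFalse_spec L arr hLnonneg
    refine ⟨by rw [hlen', hlen], ?_, ?_⟩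
    · intro p hp hpM
      rw [hget' p]
      rw [if_neg ?_]
      · exact hprime p hp hpM
      · intro hmem
        obtain ⟨hsq, _, hdvd⟩ := (hmemL p).1 hmem
        have hdvd' : v ∣ (p : Int) := by
          have := dvd_add hdvd (dvd_pow_self v two_ne_zero)
          simpa using this
        have hvn : v.toNat ∣ p := by
          have h1 : ((v.toNat : Int)) = v := by omega
          rwa [← h1, Int.natCast_dvd_natCast] at hdvd'
        rcases (Nat.Prime.eq_one_or_self_of_dvd hp v.toNat hvn) with h1 | h1
        · omega
        · have : (p : Int) = v := by omega
          rw [this] at hsq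
          nlinarith
    · intro k hk2 hkM hknp hkmf
      rw [hget' k]
      by_cases hold : (k.minFac : Int) < v
      · rw [hcomp k hk2 hkM hknp hold]
        split_ifs <;> rfl
      · have hmfv : (k.minFac : Int) = v := by omega
        rw [if_pos ?_]
        rw [hmemL]
        have hkpos : 0 < k := by omega
        have hsq : k.minFac ^ 2 ≤ k := Nat.minFac_sq_le_self hkpos hknp
        refine ⟨?_, ?_, ?_⟩
        · rw [← hmfv]; exact_mod_cast hsq
        · omega
        · have h1 : v ∣ (k : Int) := by
            rw [← hmfv, Int.natCast_dvd_natCast]; exact Nat.minFac_dvd k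
          exact dvd_sub h1 (dvd_pow_self v two_ne_zero)
  · rw [if_neg hflag]
    refine ⟨hlen, hprime, ?_⟩
    intro k hk2 hkM hknp hkmf
    by_cases hold : (k.minFac : Int) < v
    · exact hcomp k hk2 hkM hknp hold
    · exfalso
      have hmfv : (k.minFac : Int) = v := by omega
      have hmfp : Nat.Prime k.minFac := Nat.minFac_prime (by omega)
      have hmfM : k.minFac ≤ M.toNat := le_trans (Nat.minFac_le (by omega)) hkM
      have : arr.getD k.minFac false = true := hprime _ hmfp hmfM
      have hvn : v.toNat = k.minFac := by omega
      rw [← hvn] at this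
      exact hflag this

lemma pvSieve_inv (M : Int) (hM : 0 ≤ M) :
    ∀ t : Nat, pvInv M ((PySem.List.pyRange 2 (2 + (t : Int)) 1).foldl
      (fun isp x =>
        if isp.getD x.toNat false then
          (PySem.List.pyRange (x ^ 2) (M + 1) x).foldl (fun a i => a.setIfInBounds i.toNat false) isp
        else isp)
      (Array.replicate (M + 1).toNat true)) (2 + (t : Int)) := by
  intro t
  induction t with
  | zero =>
    rw [show ((0:Nat):Int) = 0 by rfl, add_zero, PySem.List.pyRange_one_eq_nil (le_refl 2)]
    simp only [List.foldl_nil]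
    refine ⟨by simp; omega, ?_, ?_⟩
    · intro p hp hpM
      rw [Array.getD_eq_getD_getElem?, Array.getElem?_replicate]
      rw [if_pos (by omega)]
      rfl
    · intro k hk2 _ hknp hmf
      exfalso
      have := Nat.Prime.two_le (Nat.minFac_prime (by omega : k ≠ 1))
      omega
  | succ n ih =>
    have hsplit : PySem.List.pyRange 2 (2 + ((n:Int) + 1)) 1
        = PySem.List.pyRange 2 (2 + (n:Int)) 1 ++ [2 + (n:Int)] := by
      rw [show (2 + ((n:Int) + 1)) = (2 + (n:Int)) + 1 by ring]
      exact PySem.List.pyRange_one_succ_right (by omega)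
    rw [Nat.cast_add, Nat.cast_one, hsplit, List.foldl_append, List.foldl_cons, List.foldl_nil]
    have := pvStep_inv M _ (2 + (n:Int)) (by omega) ih
    rw [show (2:Int) + ((n:Int) + 1) = (2 + (n:Int)) + 1 by ring]
    exact this

lemma pvSieve_prime (M : Int) (hM : 0 ≤ M) (k : Nat) (hk2 : 2 ≤ k) (hkM : (k : Int) ≤ M)
    (h : (pvSieve M).getD k false = true) : Nat.Prime k := by
  by_contra hknp
  have hkMn : k ≤ M.toNat := by omega
  have hs1 : 1 ≤ Nat.sqrt M.toNat := by
    rw [Nat.le_sqrt]; omega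
  have hform : ((Nat.sqrt M.toNat : Nat) : Int) + 1 = 2 + ((Nat.sqrt M.toNat - 1 : Nat) : Int) := by
    omega
  have hinv := pvSieve_inv M hM (Nat.sqrt M.toNat - 1)
  rw [← hform] at hinv
  obtain ⟨_, _, hcomp⟩ := hinv
  have hmf : (k.minFac : Int) < ((Nat.sqrt M.toNat : Nat) : Int) + 1 := by
    have h1 : k.minFac ^ 2 ≤ k := Nat.minFac_sq_le_self (by omega) hknp
    have h2 : k.minFac ≤ Nat.sqrt k := by
      rw [Nat.le_sqrt]; nlinarith
    have h3 : Nat.sqrt k ≤ Nat.sqrt M.toNat := Nat.sqrt_le_sqrt hkMn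
    omega
  have := hcomp k hk2 hkMn hknp hmf
  rw [pvSieve] at h
  rw [this] at h
  exact Bool.false_ne_true h

-- ===== VERDICT (by name: the statement is the Claim_ definition above) =====
theorem get_count_nums_primes_divisible_spec : Claim_equal_get_count_nums_primes_divisible := by
  intro N _ hN
  unfold Pre_get_count_nums_primes_divisible at hN
  unfold Spec_get_count_nums_primes_divisible
  unfold get_count_nums_primes_divisible get_count_nums_primes_divisible_alt
  set Mv := PySem.Int.floordiv N 2 with hMv
  have hMv0 : 0 ≤ Mv := by
    rw [hMv, PySem.Int.floordiv_eq_ediv_of_pos (by norm_num : (0:Int) < 2)]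
    exact Int.ediv_nonneg hN (by norm_num)
  set P := (PySem.List.pyRange 2 (Mv + 1) 1).filter
    (fun x => (pvSieve Mv).getD x.toNat false) with hP
  have hPrimesEq : pvGetPrimes Mv = P := by
    rw [pvGetPrimes, hP]
    simpa using pvFoldlPushIf_eq_filter (fun x => (pvSieve Mv).getD x.toNat false)
      (PySem.List.pyRange 2 (Mv + 1) 1) #[]
  have hPmem : ∀ p ∈ P, 2 ≤ p ∧ p ≤ Mv ∧ Nat.Prime p.toNat := by
    intro p hp
    rw [hP, List.mem_filter] at hp
    obtain ⟨hpr, hflag⟩ := hp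
    rw [PySem.List.mem_pyRange_one] at hpr
    have hp2 : 2 ≤ p := hpr.1
    have hpM : p ≤ Mv := by omega
    refine ⟨hp2, hpM, ?_⟩
    exact pvSieve_prime Mv hMv0 p.toNat (by omega) (by omega) (by simpa using hflag)
  have hPlt : P.Pairwise (· < ·) := by
    rw [hP]
    exact (PySem.List.pairwise_lt_pyRange_one 2 (Mv + 1)).filter _
  -- A's fold = pair sum grouped by the later prime
  have hA : ((pvGetPrimes Mv).foldl
      (fun st p =>
        (PySem.List.pyRange p (N + 1) p).foldl
          (fun st x => (st.1 + st.2.getD x.toNat 0, st.2.setIfInBounds x.toNat (st.2.getD x.toNat 0 + 1)))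
          st)
      ((0 : Int), Array.replicate (N + 1).toNat (0 : Int))).1 = pvAf (pvT N) [] P := by
    rw [hPrimesEq]
    have := pvOuterA_spec N hN P [] 0 (Array.replicate (N + 1).toNat (0 : Int))
      (by simp) ?_ ?_
    · rw [this]; ring
    · intro k _ hklen
      rw [Array.getD_eq_getD_getElem?, Array.getElem?_replicate,
        if_pos (by simpa using hklen)]
      simp
    · intro p hp; have := (hPmem p hp).1; omega
  -- B's loops = pair sum grouped by the earlier prime
  have hB : pvOuterB N P 0 = pvS (fun a b => PySem.Int.floordiv N (a * b)) P := by
    rw [pvOuterB_spec N hN P 0 hPlt (fun p hp => by have := (hPmem p hp).1; omega)]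
    ring
  -- the two pair sums agree
  have hAB : pvAf (pvT N) [] P = pvS (fun a b => PySem.Int.floordiv N (a * b)) P := by
    rw [pvAf_eq_pvS]
    have hz : ((P.map (fun _ => (0:Int))).sum : Int) = 0 := by simp
    simp only [List.map_nil, List.sum_nil]
    rw [hz, zero_add]
    apply pvS_congr
    refine List.Pairwise.imp_of_mem ?_ hPlt
    intro a b ha hb hab
    obtain ⟨ha2, _, hap⟩ := hPmem a ha
    obtain ⟨hb2, _, hbp⟩ := hPmem b hb
    exact pvT_eq_floordiv N a b hN ha2 hb2 hap hbp (ne_of_lt hab)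
  simp only at hA ⊢
  rw [hA, hAB, ← hB]
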